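-- pv_equiv track=rewrite | github.com/Liang-Jian/EKIA | python/spierfb/eslw_logcal.py | filterApLogData
-- ===== SOURCE A (Python) =====
-- def filterApLogData(logdata,start,end):
--     result = []
--     for tmp in logdata:
--         if tmp[0] < start:
--             continue
--         elif tmp[0] > end:
--             break
--         else:
--             result.append(tmp)
--     return result
-- ===== SOURCE B (Python) =====
-- def filterApLogData(logdata, start, end):
--     # phase 1: index of the first entry past `end` (A's break point when it fires)
--     cut = next((i for i, tmp in enumerate(logdata) if tmp[0] > end), len(logdata))
--     # phase 2: keep entries of the prefix that reach `start`
--     return [tmp for tmp in logdata[:cut] if tmp[0] >= start]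
-- ===== Notes on version B (the rewrite author's own statement) =====
-- stated objective: simpler
-- what changed: Replaces the single accumulating loop with break/continue by a two-phase decomposition: find the cut index of the first entry past end, then filter the prefix with a comprehension.
import Mathlib
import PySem

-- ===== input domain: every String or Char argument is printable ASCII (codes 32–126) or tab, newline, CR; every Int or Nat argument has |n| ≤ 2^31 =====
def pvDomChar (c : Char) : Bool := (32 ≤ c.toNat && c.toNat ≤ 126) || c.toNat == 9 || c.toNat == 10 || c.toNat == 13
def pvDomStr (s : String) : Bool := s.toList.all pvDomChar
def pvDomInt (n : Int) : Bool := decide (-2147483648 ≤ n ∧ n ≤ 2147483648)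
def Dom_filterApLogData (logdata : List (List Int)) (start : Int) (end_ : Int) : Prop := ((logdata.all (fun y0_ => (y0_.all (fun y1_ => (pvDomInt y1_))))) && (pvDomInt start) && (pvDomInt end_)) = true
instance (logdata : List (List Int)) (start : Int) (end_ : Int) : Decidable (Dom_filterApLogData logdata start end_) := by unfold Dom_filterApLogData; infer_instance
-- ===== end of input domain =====

-- B replaces A's single accumulating loop (break/continue) by a two-phase decomposition:
-- find the cut index of the first entry past `end`, then filter that prefix; same values on Pre_.

-- tmp[0]; Python raises IndexError on an empty entry — Pre_ excludes exactly those runs,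
-- outside Pre_ the port's default 0 is unclaimed.
def pvHead (t : List Int) : Int := (PySem.List.pyGet? t 0).getD 0

-- ===== PORT A =====
def filterApLogDataLoopA : List (List Int) → Int → Int → List (List Int) → List (List Int)
  | [], _, _, res => res
  | t :: rest, s, e, res =>
    if pvHead t < s then filterApLogDataLoopA rest s e res
    else if pvHead t > e then res
    else filterApLogDataLoopA rest s e (res ++ [t])

def filterApLogData (logdata : List (List Int)) (start : Int) (end_ : Int) : List (List Int) :=
  filterApLogDataLoopA logdata start end_ []

-- ===== PORT B =====
-- first index whose head exceeds end_, else the length (Source B's `next(..., len(logdata))`)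
def filterApLogDataCut : List (List Int) → Int → Nat
  | [], _ => 0
  | t :: rest, e => if pvHead t > e then 0 else filterApLogDataCut rest e + 1

def filterApLogData_alt (logdata : List (List Int)) (start : Int) (end_ : Int) : List (List Int) :=
  (logdata.take (filterApLogDataCut logdata end_)).filter (fun t => decide (pvHead t ≥ start))

-- ===== PRECONDITION & SPEC =====
-- Pre_ holds exactly when Python A returns: every empty entry is preceded by a nonempty
-- entry on which A's break fires (head ≥ start and head > end); otherwise A raises IndexError.
def Pre_filterApLogData (logdata : List (List Int)) (start : Int) (end_ : Int) : Prop :=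
  ∀ i < logdata.length, logdata.getD i [] = [] →
    ∃ j < i, logdata.getD j [] ≠ [] ∧ start ≤ pvHead (logdata.getD j []) ∧ end_ < pvHead (logdata.getD j [])
instance (logdata : List (List Int)) (start : Int) (end_ : Int) : Decidable (Pre_filterApLogData logdata start end_) := by
  unfold Pre_filterApLogData; infer_instance

def pvWitness_filterApLogData : List (List Int) × Int × Int := ([[1], [2], [7]], 0, 5)

def Spec_filterApLogData (logdata : List (List Int)) (start : Int) (end_ : Int) (out : List (List Int)) : Prop := out = filterApLogData_alt logdata start end_
instance (logdata : List (List Int)) (start : Int) (end_ : Int) (out : List (List Int)) : Decidable (Spec_filterApLogData logdata start end_ out) := by unfold Spec_filterApLogData; infer_instance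

-- ===== CLAIM (what is proved, stated in full; the proofs are below) =====
def Claim_equal_filterApLogData : Prop := ∀ (logdata : List (List Int)) (start : Int) (end_ : Int), Dom_filterApLogData logdata start end_ → Pre_filterApLogData logdata start end_ → Spec_filterApLogData logdata start end_ (filterApLogData logdata start end_)

-- ===== LEMMAS AND PROOFS =====

-- When the window is empty (end_ < start), A's loop can never append: each entry is either
-- skipped (head < start) or triggers the break (head ≥ start > end_).
theorem loopA_empty_window (l : List (List Int)) (s e : Int) (res : List (List Int))
    (h : e < s) : filterApLogDataLoopA l s e res = res := by
  induction l with
  | nil => rfl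
  | cons t rest ih =>
    simp only [filterApLogDataLoopA]
    split_ifs with h1 h2
    · exact ih
    · rfl
    · omega

-- Loop invariant: A's loop extends res by exactly B's value.
theorem loopA_eq_alt (l : List (List Int)) (s e : Int) (res : List (List Int)) :
    filterApLogDataLoopA l s e res = res ++ filterApLogData_alt l s e := by
  induction l generalizing res with
  | nil => simp [filterApLogDataLoopA, filterApLogData_alt, filterApLogDataCut]
  | cons t rest ih =>
    simp only [filterApLogDataLoopA]
    split_ifs with h1 h2
    · -- head < s : A skips t
      by_cases he : pvHead t > e
      · -- B cuts here (cut = 0, alt = []); A's remaining scan appends nothing since e < s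
        rw [loopA_empty_window rest s e res (by omega)]
        simp [filterApLogData_alt, filterApLogDataCut, he]
      · -- t stays in the prefix but is filtered out
        rw [ih]
        have hns : ¬ (s ≤ pvHead t) := by omega
        simp [filterApLogData_alt, filterApLogDataCut, he, hns]
    · -- head ≥ s and head > e : A breaks, B's cut is 0
      simp [filterApLogData_alt, filterApLogDataCut, h2]
    · -- s ≤ head ≤ e : both keep t
      rw [ih]
      have hks : s ≤ pvHead t := by omega
      simp [filterApLogData_alt, filterApLogDataCut, h2, hks]

-- ===== VERDICT (by name: the statement is the Claim_ definition above) =====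
theorem filterApLogData_spec : Claim_equal_filterApLogData := by
  intro logdata start end_ _ _
  unfold Spec_filterApLogData filterApLogData
  simpa using loopA_eq_alt logdata start end_ []
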